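-- pv_equiv track=rewrite | github.com/tianyilt/qzcli_tool | qzcli/cli.py | _build_picker_step_fragments
-- ===== SOURCE A (Python) =====
-- from typing import Any, Dict, List, Optional, Sequence, Tuple
--
-- def _build_picker_step_fragments(
--     levels: List[str], current_index: int
-- ) -> List[Tuple[str, str]]:
--     """构造层级导航栏。"""
--     names = {
--         "workspace": "工作空间",
--         "project": "项目",
--         "compute_group": "计算组",
--         "spec": "规格",
--     }
--     fragments: List[Tuple[str, str]] = []
--     for idx, level in enumerate(levels):
--         style = "class:picker-step-pending"
--         if idx < current_index:
--             style = "class:picker-step-done"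
--         elif idx == current_index:
--             style = "class:picker-step-active"
--         fragments.append((style, names.get(level, level)))
--         if idx < len(levels) - 1:
--             fragments.append(("class:picker-sep", "  >  "))
--     return fragments
-- ===== SOURCE B (Python) =====
-- def _build_picker_step_fragments(levels, current_index):
--     """构造层级导航栏。"""
--     names = {
--         "workspace": "工作空间",
--         "project": "项目",
--         "compute_group": "计算组",
--         "spec": "规格",
--     }
--
--     def frag(i):
--         # positional construction: odd positions are separators,
--         # even position i holds the styled step for level i // 2
--         if i % 2:
--             return ("class:picker-sep", "  >  ")
--         idx = i // 2
--         if idx < current_index: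
--             style = "class:picker-step-done"
--         elif idx == current_index:
--             style = "class:picker-step-active"
--         else:
--             style = "class:picker-step-pending"
--         return (style, names.get(levels[idx], levels[idx]))
--
--     return [frag(i) for i in range(2 * len(levels) - 1)]
-- ===== Notes on version B (the rewrite author's own statement) =====
-- stated objective: alternative
-- what changed: B constructs the breadcrumb positionally as a closed-form indexed comprehension over range(2*len(levels)-1): odd output positions are separators and even position i is the styled step for level i//2, replacing A's sequential accumulator loop with its look-ahead separator check.
import Mathlib
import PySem

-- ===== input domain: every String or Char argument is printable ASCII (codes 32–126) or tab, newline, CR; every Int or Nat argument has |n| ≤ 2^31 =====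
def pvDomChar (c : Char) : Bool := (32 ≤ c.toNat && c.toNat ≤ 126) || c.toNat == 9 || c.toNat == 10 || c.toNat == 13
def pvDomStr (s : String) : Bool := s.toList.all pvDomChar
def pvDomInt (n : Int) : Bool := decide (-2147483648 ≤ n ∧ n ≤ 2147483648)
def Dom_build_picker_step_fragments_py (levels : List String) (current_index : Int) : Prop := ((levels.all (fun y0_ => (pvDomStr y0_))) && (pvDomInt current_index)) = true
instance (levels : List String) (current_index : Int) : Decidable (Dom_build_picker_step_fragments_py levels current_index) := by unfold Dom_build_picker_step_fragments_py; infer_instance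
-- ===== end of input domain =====

-- B builds the breadcrumb positionally (odd output positions are separators, even position i is
-- the styled step for level i/2) instead of A's sequential loop with a look-ahead separator check;
-- objective: alternative decomposition, same cost.

-- ===== PORT A =====
-- the dict literal `names` (shared by both ports' source)
def pvNames : PySem.Dict String String :=
  PySem.Dict.ofList
    [("workspace", "工作空间"), ("project", "项目"), ("compute_group", "计算组"), ("spec", "规格")]

-- A: one fused loop over enumerate(levels); appends the step, then, looking ahead
-- (idx < len(levels) - 1), appends the separator.
def build_picker_step_fragments_py (levels : List String) (current_index : Int) : List (String × String) :=
  (PySem.List.enumerate levels 0).foldl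
    (fun fragments p =>
      let style := "class:picker-step-pending"
      let style := if p.1 < current_index then "class:picker-step-done"
                   else if p.1 = current_index then "class:picker-step-active"
                   else style
      let fragments := fragments ++ [(style, pvNames.getD p.2 p.2)]
      if p.1 < (levels.length : Int) - 1 then fragments ++ [("class:picker-sep", "  >  ")]
      else fragments)
    []

-- ===== PORT B =====
-- B's helper frag(i): the fragment at output position i.  Python's levels[idx] is always in
-- range here (idx = i/2 < len(levels) for every generated i), so `getD idx ""` is exact.
def pvFrag (levels : List String) (current_index : Int) (i : Nat) : String × String :=
  if i % 2 = 1 then ("class:picker-sep", "  >  ")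
  else
    (if ((i / 2 : Nat) : Int) < current_index then "class:picker-step-done"
     else if ((i / 2 : Nat) : Int) = current_index then "class:picker-step-active"
     else "class:picker-step-pending",
     pvNames.getD (levels.getD (i / 2) "") (levels.getD (i / 2) ""))

-- B: [frag(i) for i in range(2*len(levels)-1)]  (Python range(-1) is empty, matching Nat `2*0-1 = 0`)
def build_picker_step_fragments_py_alt (levels : List String) (current_index : Int) : List (String × String) :=
  (List.range (2 * levels.length - 1)).map (pvFrag levels current_index)

-- ===== PRECONDITION & SPEC =====
def Spec_build_picker_step_fragments_py (levels : List String) (current_index : Int) (out : List (String × String)) : Prop := out = build_picker_step_fragments_py_alt levels current_index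
instance (levels : List String) (current_index : Int) (out : List (String × String)) : Decidable (Spec_build_picker_step_fragments_py levels current_index out) := by unfold Spec_build_picker_step_fragments_py; infer_instance

-- ===== CLAIM (what is proved, stated in full; the proofs are below) =====
def Claim_equal_build_picker_step_fragments_py : Prop := ∀ (levels : List String) (current_index : Int), Dom_build_picker_step_fragments_py levels current_index → Spec_build_picker_step_fragments_py levels current_index (build_picker_step_fragments_py levels current_index)

-- ===== LEMMAS AND PROOFS =====

def pvSep : String × String := ("class:picker-sep", "  >  ")

def pvStep (ci : Int) (p : Int × String) : String × String :=
  let style := if p.1 < ci then "class:picker-step-done"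
               else if p.1 = ci then "class:picker-step-active"
               else "class:picker-step-pending"
  (style, pvNames.getD p.2 p.2)

-- common normal form: first step, then [sep, step] for every further step
def pvJoin (steps : List (String × String)) : List (String × String) :=
  match steps with
  | [] => []
  | s :: ss => s :: ss.flatMap (fun t => [pvSep, t])

-- closed form of A's loop starting at position k over the remaining levels, with n = len(levels)
def pvPartA (ci n : Int) : List String → Int → List (String × String)
  | [], _ => []
  | x :: xs, k =>
      pvStep ci (k, x) :: ((if k < n - 1 then [pvSep] else []) ++ pvPartA ci n xs (k + 1))

theorem pvFoldA (ci n : Int) (l : List String) :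
    ∀ (k : Int) (acc : List (String × String)),
    (PySem.List.enumerate l k).foldl
      (fun fragments p =>
        let style := "class:picker-step-pending"
        let style := if p.1 < ci then "class:picker-step-done"
                     else if p.1 = ci then "class:picker-step-active"
                     else style
        let fragments := fragments ++ [(style, pvNames.getD p.2 p.2)]
        if p.1 < n - 1 then fragments ++ [pvSep] else fragments)
      acc
    = acc ++ pvPartA ci n l k := by
  induction l with
  | nil => intro k acc; simp [PySem.List.enumerate_nil, pvPartA]
  | cons x xs ih =>
      intro k acc
      rw [PySem.List.enumerate_cons, List.foldl_cons, ih]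
      simp only [pvPartA, pvStep, pvSep]
      split_ifs <;> simp

theorem pvPartA_join (ci n : Int) (l : List String) :
    ∀ (k : Int), k + l.length = n →
    pvPartA ci n l k = pvJoin ((PySem.List.enumerate l k).map (pvStep ci)) := by
  induction l with
  | nil => intro k _; simp [pvPartA, PySem.List.enumerate_nil, pvJoin]
  | cons x xs ih =>
      intro k hk
      rw [PySem.List.enumerate_cons]
      simp only [pvPartA, List.map_cons, pvJoin]
      cases xs with
      | nil =>
          have : ¬ (k < n - 1) := by simp at hk; omega
          simp [this, PySem.List.enumerate_nil, pvPartA]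
      | cons y ys =>
          have hlt : k < n - 1 := by simp at hk; omega
          rw [if_pos hlt]
          have := ih (k + 1) (by simp at hk ⊢; omega)
          rw [this]
          rw [PySem.List.enumerate_cons]
          simp [pvJoin]

theorem pvJoin_snoc (ss : List (String × String)) (t : String × String) (h : ss ≠ []) :
    pvJoin (ss ++ [t]) = pvJoin ss ++ [pvSep, t] := by
  cases ss with
  | nil => exact absurd rfl h
  | cons s ss' => simp [pvJoin]

-- B equals the same normal form
theorem pvAltJoin (ci : Int) (l : List String) :
    build_picker_step_fragments_py_alt l ci
      = pvJoin ((PySem.List.enumerate l 0).map (pvStep ci)) := by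
  induction l using List.reverseRecOn with
  | nil => simp [build_picker_step_fragments_py_alt, PySem.List.enumerate_nil, pvJoin]
  | append_singleton l x ih =>
      cases l with
      | nil =>
          simp [build_picker_step_fragments_py_alt, PySem.List.enumerate_cons,
                PySem.List.enumerate_nil, pvJoin, pvFrag, pvStep, List.range_succ]
      | cons y ys =>
          set m := (y :: ys).length with hm
          have hm1 : 1 ≤ m := by simp [hm]
          have hr : 2 * (y :: ys ++ [x]).length - 1 = (2 * m - 1) + 2 := by
            simp [hm]; omega
          rw [build_picker_step_fragments_py_alt, hr, List.range_add, List.map_append,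
              List.map_map]
          have hpre : (List.range (2 * m - 1)).map (pvFrag ((y :: ys) ++ [x]) ci)
              = (List.range (2 * m - 1)).map (pvFrag (y :: ys) ci) := by
            refine List.map_congr_left ?_
            intro i hi
            rw [List.mem_range] at hi
            unfold pvFrag
            by_cases hodd : i % 2 = 1
            · rw [if_pos hodd, if_pos hodd]
            · rw [if_neg hodd, if_neg hodd]
              have hg : ((y :: ys) ++ [x]).getD (i / 2) "" = (y :: ys).getD (i / 2) "" := by
                simp only [List.getD,
                  List.getElem?_append_left (show i / 2 < (y :: ys).length by omega)]
              rw [hg]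
          have hA : pvFrag ((y :: ys) ++ [x]) ci (2 * m - 1) = pvSep := by
            unfold pvFrag pvSep
            rw [if_pos (by omega)]
          have hB : pvFrag ((y :: ys) ++ [x]) ci (2 * m) = pvStep ci ((m : Int), x) := by
            have hdiv : 2 * m / 2 = m := by omega
            have hsome : (y :: (ys ++ [x]))[m]? = some x := by
              have h := List.getElem?_append_right
                (l₁ := y :: ys) (l₂ := [x]) (by omega : (y :: ys).length ≤ m)
              simp only [List.cons_append] at h
              rw [h]
              simp [hm]
            unfold pvFrag pvStep
            rw [if_neg (by omega)]
            simp [hdiv, List.getD, hsome]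
          have htail : (List.range 2).map (pvFrag ((y :: ys) ++ [x]) ci ∘ fun k => 2 * m - 1 + k)
              = [pvSep, pvStep ci ((m : Int), x)] := by
            rw [show (List.range 2) = [0, 1] from rfl]
            simp only [List.map_cons, List.map_nil, Function.comp_apply, Nat.add_zero]
            rw [show 2 * m - 1 + 1 = 2 * m by omega, hA, hB]
          have henum : (PySem.List.enumerate ((y :: ys) ++ [x]) 0).map (pvStep ci)
              = (PySem.List.enumerate (y :: ys) 0).map (pvStep ci) ++ [pvStep ci ((m : Int), x)] := by
            rw [PySem.List.enumerate_append]
            simp [PySem.List.enumerate_cons, PySem.List.enumerate_nil, hm]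
          rw [hpre, htail, henum,
              pvJoin_snoc _ _ (by simp [PySem.List.enumerate_cons]), ← ih]
          unfold build_picker_step_fragments_py_alt
          rw [← hm]

-- ===== VERDICT (by name: the statement is the Claim_ definition above) =====
theorem build_picker_step_fragments_py_spec : Claim_equal_build_picker_step_fragments_py := by
  intro levels ci _
  unfold Spec_build_picker_step_fragments_py
  rw [pvAltJoin]
  unfold build_picker_step_fragments_py
  rw [show (("class:picker-sep", "  >  ") : String × String) = pvSep from rfl]
  rw [pvFoldA ci (levels.length : Int) levels 0 []]
  rw [pvPartA_join ci (levels.length : Int) levels 0 (by simp)]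
  rfl
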